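-- pv_equiv track=rewrite | github.com/jkjium/contactGroups | proc_foxd.py | _ortho_1to1
-- ===== SOURCE A (Python) =====
-- from collections import defaultdict
--
-- def _ortho_1to1(tuple_list):
--     # merge potential 1toMany terms
--     dict_1tomany = defaultdict(list)
--     for t in tuple_list:
--         query = t[1].split(',')
--         hit = t[2].split(',')
--         if(len(query)==1 and len(hit)==1):
--             dict_1tomany[query[0]].append(hit[0])
--     # remove 1 to many
--     return dict ((q, dict_1tomany[q][0]) for q in dict_1tomany if len(dict_1tomany[q])==1)
-- ===== SOURCE B (Python) =====
-- def _ortho_1to1(tuple_list):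
--     # single pass: keep first hit per unique 1-1 query, ban queries seen more than once
--     result = {}
--     banned = set()
--     for t in tuple_list:
--         query = t[1].split(',')
--         hit = t[2].split(',')
--         if len(query) == 1 and len(hit) == 1:
--             q = query[0]
--             h = hit[0]
--             if q in banned:
--                 continue
--             if q in result:
--                 del result[q]
--                 banned.add(q)
--             else:
--                 result[q] = h
--     return result
-- ===== Notes on version B (the rewrite author's own statement) =====
-- stated objective: alternative
-- what changed: Replaces the two-pass grouping (defaultdict of hit lists, then a filtering dict comprehension) by a single pass that keeps only the first hit per query and invalidates repeated queries via a banned set.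
import Mathlib
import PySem

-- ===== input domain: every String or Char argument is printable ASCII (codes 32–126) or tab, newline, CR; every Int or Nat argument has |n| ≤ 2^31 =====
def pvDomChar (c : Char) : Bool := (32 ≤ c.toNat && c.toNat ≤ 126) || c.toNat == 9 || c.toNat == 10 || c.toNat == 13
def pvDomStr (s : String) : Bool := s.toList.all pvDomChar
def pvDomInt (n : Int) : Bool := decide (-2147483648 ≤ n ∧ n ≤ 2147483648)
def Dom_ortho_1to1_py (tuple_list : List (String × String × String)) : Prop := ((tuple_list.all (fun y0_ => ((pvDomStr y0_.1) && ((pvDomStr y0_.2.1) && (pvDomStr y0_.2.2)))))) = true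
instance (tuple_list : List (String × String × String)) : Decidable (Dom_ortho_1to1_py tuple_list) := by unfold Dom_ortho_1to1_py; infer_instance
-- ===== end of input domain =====

-- B replaces A's two passes (group all hits per query, then filter to unique ones) by a
-- single pass keeping the first hit per query and invalidating repeats via a banned set.

-- ===== PORT A =====
-- s.split(',') : the separator "," is nonempty, so PySem.Str.split? is always `some`;
-- `.getD []` is exact here (the default branch is unreachable).
def pvSplitComma (s : String) : List String := (PySem.Str.split? s ",").getD []

-- loop body of A's first pass: ' if len(query)==1 and len(hit)==1: dict_1tomany[query[0]].append(hit[0]) '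
def pvStepA (d : PySem.Dict String (List String)) (t : String × String × String) :
    PySem.Dict String (List String) :=
  match pvSplitComma t.2.1, pvSplitComma t.2.2 with
  | [q], [h] => d.modify q [] (· ++ [h])
  | _, _ => d

def ortho_1to1_py (tuple_list : List (String × String × String)) : List (String × String) :=
  let d := tuple_list.foldl pvStepA PySem.Dict.empty
  -- dict((q, dict_1tomany[q][0]) for q in dict_1tomany if len(dict_1tomany[q])==1)
  (d.keys.foldl (fun out q =>
      if (d.getD q []).length == 1 then out.insert q ((d.getD q []).headD "") else out)
    PySem.Dict.empty).items

-- ===== PORT B =====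
-- loop body of B: skip banned q; a repeated q is deleted from result and banned; else record first hit
def pvStepB (st : PySem.Dict String String × PySem.Set String) (t : String × String × String) :
    PySem.Dict String String × PySem.Set String :=
  match pvSplitComma t.2.1, pvSplitComma t.2.2 with
  | [q], [h] =>
    if st.2.contains q then st
    else if st.1.contains q then (st.1.erase q, st.2.add q)
    else (st.1.insert q h, st.2)
  | _, _ => st

def ortho_1to1_py_alt (tuple_list : List (String × String × String)) : List (String × String) :=
  (tuple_list.foldl pvStepB (PySem.Dict.empty, PySem.Set.empty)).1.items

-- ===== PRECONDITION & SPEC =====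
def Spec_ortho_1to1_py (tuple_list : List (String × String × String)) (out : List (String × String)) : Prop := out = ortho_1to1_py_alt tuple_list
instance (tuple_list : List (String × String × String)) (out : List (String × String)) : Decidable (Spec_ortho_1to1_py tuple_list out) := by unfold Spec_ortho_1to1_py; infer_instance

-- ===== CLAIM (what is proved, stated in full; the proofs are below) =====
def Claim_equal_ortho_1to1_py : Prop := ∀ (tuple_list : List (String × String × String)), Dom_ortho_1to1_py tuple_list → Spec_ortho_1to1_py tuple_list (ortho_1to1_py tuple_list)

-- ===== LEMMAS AND PROOFS =====

-- the projection from A's grouped dict to B's result dict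
def pvProj (l : List (String × List String)) : List (String × String) :=
  (l.filter (fun p => p.2.length == 1)).map (fun p => (p.1, p.2.headD ""))

-- invariant tying B's state to A's grouping dict
def pvInv (d : PySem.Dict String (List String))
    (st : PySem.Dict String String × PySem.Set String) : Prop :=
  st.1.items = pvProj d.items
  ∧ (∀ q : String, st.2.contains q = decide (2 ≤ (d.getD q []).length))
  ∧ (∀ p ∈ d.items, p.2 ≠ [])
  ∧ (d.items.map Prod.fst).Nodup

theorem pv_find?_of_mem_nodup (l : List (String × List String)) (p : String × List String)
    (hn : (l.map Prod.fst).Nodup) (hm : p ∈ l) :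
    l.find? (fun x => x.1 == p.1) = some p := by
  induction l with
  | nil => cases hm
  | cons a t ih =>
    simp only [List.map_cons, List.nodup_cons] at hn
    rcases List.mem_cons.mp hm with h | h
    · subst h; exact List.find?_cons_of_pos (by simp)
    · have hne : a.1 ≠ p.1 := fun he => hn.1 (he ▸ List.mem_map_of_mem h)
      rw [List.find?_cons_of_neg (by simp [hne])]
      exact ih hn.2 h

theorem pv_getD_of_mem (d : PySem.Dict String (List String)) (p : String × List String)
    (hn : (d.items.map Prod.fst).Nodup) (hm : p ∈ d.items) :
    d.getD p.1 [] = p.2 := by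
  simp [PySem.Dict.getD, PySem.Dict.get?, pv_find?_of_mem_nodup d.items p hn hm]

theorem pv_mem_of_contains (d : PySem.Dict String (List String)) (q : String)
    (hc : d.contains q = true) : (q, d.getD q []) ∈ d.items := by
  cases hf : d.items.find? (fun x => x.1 == q) with
  | none =>
    exfalso
    rcases List.any_eq_true.mp hc with ⟨p, hp, hb⟩
    exact (List.find?_eq_none.mp hf p hp) hb
  | some p =>
    have h1 : (p.1 == q) = true := by
      have := List.find?_some hf
      exact this
    have h2 : p ∈ d.items := List.mem_of_find?_eq_some hf
    have : d.getD q [] = p.2 := by simp [PySem.Dict.getD, PySem.Dict.get?, hf]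
    rw [this]
    have : q = p.1 := (eq_of_beq h1).symm
    rw [this]
    exact h2

theorem pv_contains_of_getD_ne (d : PySem.Dict String (List String)) (q : String)
    (h : d.getD q [] ≠ []) : d.contains q = true := by
  by_contra hc
  have hc' : d.contains q = false := by revert hc; cases d.contains q <;> simp
  have : d.get? q = none := (PySem.Dict.get?_eq_none_iff_contains d q).mpr hc'
  exact h (by simp [PySem.Dict.getD, this])

theorem pv_items_insert_not_contains {ν : Type} (d : PySem.Dict String ν) (k : String)
    (v : ν) (h : d.contains k = false) :
    (d.insert k v).items = d.items ++ [(k, v)] := by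
  simp [PySem.Dict.insert, h]

theorem pv_items_insert_contains {ν : Type} (d : PySem.Dict String ν) (k : String)
    (v : ν) (h : d.contains k = true) :
    (d.insert k v).items = d.items.map (fun p => if p.1 == k then (k, v) else p) := by
  simp [PySem.Dict.insert, h]

-- pvProj of a cons, explicitly
theorem pvProj_cons (p : String × List String) (l : List (String × List String)) :
    pvProj (p :: l)
      = (if (p.2.length == 1) = true then [(p.1, p.2.headD "")] else []) ++ pvProj l := by
  simp only [pvProj, List.filter_cons]
  split <;> simp

-- replacing key q's value by one failing the length-1 filter = erasing q from the projection
theorem pv_proj_map_update (l : List (String × List String)) (q : String) (w : List String)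
    (hw : (w.length == 1) = false) :
    pvProj (l.map (fun p => if p.1 == q then (q, w) else p))
      = (pvProj l).filter (fun p => !(p.1 == q)) := by
  induction l with
  | nil => simp [pvProj]
  | cons a t ih =>
    simp only [List.map_cons, pvProj_cons, List.filter_append, ih]
    by_cases hq : a.1 = q
    · simp only [hq, beq_self_eq_true, if_true]
      simp only [hw, Bool.false_eq_true, if_false, List.nil_append]
      split <;> simp
    · have hb : (a.1 == q) = false := by simp [hq]
      simp only [hb, Bool.false_eq_true, if_false]
      split <;> simp [hb]

-- q never appears as a key of the projection of a list whose q-entries all fail the filter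
theorem pv_not_mem_proj (l : List (String × List String)) (q : String)
    (h : ∀ p ∈ l, p.1 = q → (p.2.length == 1) = false) :
    ∀ r ∈ pvProj l, r.1 ≠ q := by
  intro r hr
  rcases List.mem_map.mp hr with ⟨p, hp, he⟩
  have hpl := List.mem_of_mem_filter hp
  have hpf := List.of_mem_filter hp
  intro hrq
  have : p.1 = q := by rw [← he] at hrq; exact hrq
  rw [h p hpl this] at hpf; cases hpf

theorem pv_filter_key_ne (l : List (String × String)) (q : String)
    (h : ∀ r ∈ l, r.1 ≠ q) : l.filter (fun p => !(p.1 == q)) = l := by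
  apply List.filter_eq_self.mpr
  intro r hr; simp [h r hr]

theorem pv_inv_step (d : PySem.Dict String (List String))
    (st : PySem.Dict String String × PySem.Set String) (t : String × String × String)
    (hI : pvInv d st) : pvInv (pvStepA d t) (pvStepB st t) := by
  obtain ⟨h1, h2, h3, h4⟩ := hI
  unfold pvStepA pvStepB
  cases hq : pvSplitComma t.2.1 with
  | nil => exact ⟨h1, h2, h3, h4⟩
  | cons q qs =>
  cases qs with
  | cons _ _ => exact ⟨h1, h2, h3, h4⟩
  | nil =>
  cases hh : pvSplitComma t.2.2 with
  | nil => exact ⟨h1, h2, h3, h4⟩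
  | cons h hs =>
  cases hs with
  | cons _ _ => exact ⟨h1, h2, h3, h4⟩
  | nil =>
  simp only []
  -- the good-pair case; analyse the multiplicity of q in d
  cases hv : d.getD q [] with
  | nil =>
    -- q is a fresh query
    have hcd : d.contains q = false := by
      by_contra hc
      have hc' : d.contains q = true := by revert hc; cases d.contains q <;> simp
      have hm := pv_mem_of_contains d q hc'
      rw [hv] at hm
      exact h3 _ hm rfl
    have hban : st.2.contains q = false := by rw [h2 q, hv]; simp
    have hres : st.1.contains q = false := by
      by_contra hc
      have hc' : st.1.contains q = true := by revert hc; cases st.1.contains q <;> simp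
      rcases List.any_eq_true.mp hc' with ⟨r, hr, hb⟩
      rw [h1] at hr
      rcases List.mem_map.mp hr with ⟨p, hp, he⟩
      have hpl := List.mem_of_mem_filter hp
      have : p.1 = q := by
        have := eq_of_beq hb
        rw [← he] at this; exact this
      have hmem : d.contains q = true := by
        apply List.any_eq_true.mpr
        exact ⟨p, hpl, by simp [this]⟩
      rw [hmem] at hcd; cases hcd
    rw [hban, hres]
    simp only [Bool.false_eq_true, if_false]
    have hda : (d.modify q [] (· ++ [h])).items = d.items ++ [(q, [h])] := by
      rw [PySem.Dict.modify, hv]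
      exact pv_items_insert_not_contains d q _ hcd
    refine ⟨?_, ?_, ?_, ?_⟩
    · rw [pv_items_insert_not_contains st.1 q h (by
        simpa [PySem.Dict.contains] using hres), hda]
      simp [pvProj, h1]
    · intro q'
      by_cases he : q' = q
      · subst he
        rw [PySem.Dict.modify, hv, PySem.Dict.getD_insert_self, hban]
        simp
      · rw [PySem.Dict.modify, PySem.Dict.getD_insert_of_ne _ _ _ he, h2 q']
    · intro p hp
      rw [hda] at hp
      rcases List.mem_append.mp hp with hp | hp
      · exact h3 p hp
      · simp at hp; rw [hp]; simp
    · rw [hda]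
      simp only [List.map_append, List.map_cons, List.map_nil]
      apply List.Nodup.append h4 (by simp)
      intro a ha hb
      simp at hb; subst hb
      have : d.contains a = true := by
        rcases List.mem_map.mp ha with ⟨p, hp, he⟩
        exact List.any_eq_true.mpr ⟨p, hp, by simp [he]⟩
      rw [this] at hcd; cases hcd
  | cons h0 v0 =>
    have hcd : d.contains q = true := pv_contains_of_getD_ne d q (by rw [hv]; simp)
    have hmemd : (q, h0 :: v0) ∈ d.items := by have := pv_mem_of_contains d q hcd; rwa [hv] at this
    have hkeysame : ((d.modify q [] (· ++ [h])).items.map Prod.fst) = d.items.map Prod.fst := by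
      rw [PySem.Dict.modify, hv, pv_items_insert_contains d q _ hcd, List.map_map]
      apply List.map_congr_left
      intro p _
      by_cases he : p.1 = q <;> simp [he]
    have hda : (d.modify q [] (· ++ [h])).items
        = d.items.map (fun p => if p.1 == q then (q, (h0 :: v0) ++ [h]) else p) := by
      rw [PySem.Dict.modify, hv]
      exact pv_items_insert_contains d q _ hcd
    have hval : ∀ p ∈ (d.modify q [] (· ++ [h])).items, p.2 ≠ [] := by
      intro p hp
      rw [hda] at hp
      rcases List.mem_map.mp hp with ⟨p', hp', he⟩
      by_cases he' : p'.1 = q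
      · rw [← he]; simp [he']
      · have hb : (p'.1 == q) = false := by simp [he']
        rw [← he]
        simp only [hb, Bool.false_eq_true, if_false]
        exact h3 p' hp'
    have hnodup : ((d.modify q [] (· ++ [h])).items.map Prod.fst).Nodup := by
      rw [hkeysame]; exact h4
    -- value of every q-keyed entry of d.items is h0 :: v0 (keys are nodup)
    have huniq : ∀ p ∈ d.items, p.1 = q → p.2 = h0 :: v0 := by
      intro p hp hpq
      have := pv_getD_of_mem d p h4 hp
      rw [hpq, hv] at this; exact this.symm
    cases v0 with
    | nil =>
      -- second occurrence of q: B deletes and bans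
      have hban : st.2.contains q = false := by rw [h2 q, hv]; simp
      have hres : st.1.contains q = true := by
        apply List.any_eq_true.mpr
        refine ⟨(q, h0), ?_, by simp⟩
        rw [h1]
        apply List.mem_map.mpr
        exact ⟨(q, [h0]), List.mem_filter.mpr ⟨hmemd, by simp⟩, by simp⟩
      rw [hban, hres]
      simp only [Bool.false_eq_true, if_false, if_true]
      refine ⟨?_, ?_, hval, hnodup⟩
      · show (st.1.erase q).items = _
        rw [hda, pv_proj_map_update d.items q _ (by simp)]
        simp only [PySem.Dict.erase, h1]
      · intro q'
        by_cases he : q' = q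
        · subst he
          rw [PySem.Dict.modify, hv, PySem.Dict.getD_insert_self]
          have hadd : st.2.add q' = st.2 ++ [q'] := by
            rw [PySem.Set.add, if_neg (by rw [hban]; simp)]
          have : (st.2.add q').contains q' = true := by
            rw [hadd]
            simp [PySem.Set.contains]
          rw [this]; simp
        · rw [PySem.Dict.modify, PySem.Dict.getD_insert_of_ne _ _ _ he, ← h2 q']
          have hadd : st.2.add q = st.2 ++ [q] := by
            rw [PySem.Set.add, if_neg (by rw [hban]; simp)]
          show (st.2.add q).contains q' = st.2.contains q'
          rw [hadd]
          simp [PySem.Set.contains, he]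
    | cons h1' v1 =>
      -- q already banned: both sides only grow the (already filtered-out) hit list
      have hban : st.2.contains q = true := by rw [h2 q, hv]; simp
      rw [hban]
      simp only [if_true]
      refine ⟨?_, ?_, hval, hnodup⟩
      · rw [h1, hda, pv_proj_map_update d.items q _ (by simp)]
        apply (pv_filter_key_ne _ q ?_).symm
        apply pv_not_mem_proj
        intro p hp hpq
        rw [huniq p hp hpq]; simp
      · intro q'
        by_cases he : q' = q
        · subst he
          rw [PySem.Dict.modify, hv, PySem.Dict.getD_insert_self, hban]
          simp
        · rw [PySem.Dict.modify, PySem.Dict.getD_insert_of_ne _ _ _ he, h2 q']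

theorem pv_inv_fold (l : List (String × String × String)) :
    ∀ (d : PySem.Dict String (List String)) (st : PySem.Dict String String × PySem.Set String),
    pvInv d st → pvInv (l.foldl pvStepA d) (l.foldl pvStepB st) := by
  induction l with
  | nil => intro d st h; exact h
  | cons t l ih =>
    intro d st h
    exact ih _ _ (pv_inv_step d st t h)

theorem pv_inv_init : pvInv PySem.Dict.empty (PySem.Dict.empty, PySem.Set.empty) := by
  refine ⟨rfl, fun q => rfl, ?_, ?_⟩
  · intro p hp
    simp [PySem.Dict.empty] at hp
  · simp [PySem.Dict.empty]

-- A's second pass over keys builds exactly the projection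
theorem pv_fold2 (d : PySem.Dict String (List String)) (l : List (String × List String)) :
    ∀ (out : PySem.Dict String String),
    (∀ p ∈ l, d.getD p.1 [] = p.2) →
    (∀ p ∈ l, (p.2.length == 1) = true → out.contains p.1 = false) →
    (l.map Prod.fst).Nodup →
    (l.foldl (fun out p =>
        if (d.getD p.1 []).length == 1 then out.insert p.1 ((d.getD p.1 []).headD "") else out)
      out).items = out.items ++ pvProj l := by
  induction l with
  | nil => intro out _ _ _; simp [pvProj]
  | cons p l ih =>
    intro out hget hfresh hnod
    have hgp : d.getD p.1 [] = p.2 := hget p (List.mem_cons_self ..)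
    simp only [List.map_cons, List.nodup_cons] at hnod
    by_cases hlen : (p.2.length == 1) = true
    · have hfp : out.contains p.1 = false := hfresh p (List.mem_cons_self ..) hlen
      simp only [List.foldl_cons, hgp, hlen, if_true]
      rw [ih (out.insert p.1 (p.2.headD ""))
        (fun p' hp' => hget p' (List.mem_cons_of_mem _ hp'))
        ?_ hnod.2]
      · have : (out.insert p.1 (p.2.headD "")).items = out.items ++ [(p.1, p.2.headD "")] := by
          simp [PySem.Dict.insert, hfp]
        rw [this, List.append_assoc]
        simp [pvProj, hlen]
      · intro p' hp' hlen'
        have hne : p'.1 ≠ p.1 := by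
          intro he
          exact hnod.1 (he ▸ List.mem_map_of_mem hp')
        show (out.insert p.1 (p.2.headD "")).items.any (fun r => r.1 == p'.1) = false
        rw [pv_items_insert_not_contains out _ _ hfp]
        have := hfresh p' (List.mem_cons_of_mem _ hp') hlen'
        simp only [PySem.Dict.contains] at this
        simp [List.any_append, this, hne.symm]
    · have hlen' : (p.2.length == 1) = false := by revert hlen; cases (p.2.length == 1) <;> simp
      simp only [List.foldl_cons, hgp, hlen', Bool.false_eq_true, if_false]
      rw [ih out (fun p' hp' => hget p' (List.mem_cons_of_mem _ hp'))
        (fun p' hp' => hfresh p' (List.mem_cons_of_mem _ hp')) hnod.2]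
      simp [pvProj, hlen']

-- ===== VERDICT (by name: the statement is the Claim_ definition above) =====
theorem ortho_1to1_py_spec : Claim_equal_ortho_1to1_py := by
  intro tuple_list _
  unfold Spec_ortho_1to1_py ortho_1to1_py ortho_1to1_py_alt
  have hI := pv_inv_fold tuple_list PySem.Dict.empty (PySem.Dict.empty, PySem.Set.empty) pv_inv_init
  obtain ⟨h1, _, _, h4⟩ := hI
  set d := tuple_list.foldl pvStepA PySem.Dict.empty with hd
  show (d.keys.foldl _ PySem.Dict.empty).items = _
  rw [show d.keys = d.items.map Prod.fst from rfl, List.foldl_map]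
  rw [pv_fold2 d d.items PySem.Dict.empty
    (fun p hp => pv_getD_of_mem d p h4 hp)
    (fun p _ _ => rfl) h4]
  simpa using h1.symm
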